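-- pv_equiv track=rewrite | github.com/MasterIceZ/2110101 | 07_StrFile/32_PasswordStrength.py | keyboard_pattern
-- ===== SOURCE A (Python) =====
-- def keyboard_pattern(t):
--   s = [
--     "qwertyuiop",
--     "asdfghjkl",
--     "zxcvbnm",
--     "!@#$%^&*()_+"
--   ]
--   t = t.lower()
--   for ss in s:
--     for i in range(len(t)-3):
--       if t[i:i+4] in ss or t[i:i+4] in ss[::-1]:
--         return True
--   return False
-- ===== SOURCE B (Python) =====
-- _ROWS = ["qwertyuiop", "asdfghjkl", "zxcvbnm", "!@#$%^&*()_+"]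
-- # keyboard coordinates: char -> (row index, column index)
-- _POS = {ch: (r, c) for r, row in enumerate(_ROWS) for c, ch in enumerate(row)}
--
--
-- def _step(a, b):
--     # direction (+1 or -1) if a, b are horizontally adjacent keys of the same row, else None
--     p = _POS.get(a)
--     q = _POS.get(b)
--     if p is None or q is None or p[0] != q[0] or abs(q[1] - p[1]) != 1:
--         return None
--     return q[1] - p[1]
--
--
-- def keyboard_pattern(t):
--     # streaming automaton: track the length of the current run of keys that are
--     # consecutive on one row in one direction; a run of 4 keys is a pattern
--     t = t.lower()
--     run, direction = 1, 0
--     for a, b in zip(t, t[1:]):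
--         d = _step(a, b)
--         if d is None:
--             run, direction = 1, 0
--         elif d == direction:
--             run += 1
--         else:
--             run, direction = 2, d
--         if run >= 4:
--             return True
--     return False
-- ===== Notes on version B (the rewrite author's own statement) =====
-- stated objective: faster
-- what changed: Replaces A's nested rows-by-windows substring search with a streaming automaton: a char->(row,col) coordinate map is built once, and a single left-to-right pass tracks the length of the current run of horizontally adjacent same-direction keys, returning True the moment a run reaches 4.
import Mathlib
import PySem

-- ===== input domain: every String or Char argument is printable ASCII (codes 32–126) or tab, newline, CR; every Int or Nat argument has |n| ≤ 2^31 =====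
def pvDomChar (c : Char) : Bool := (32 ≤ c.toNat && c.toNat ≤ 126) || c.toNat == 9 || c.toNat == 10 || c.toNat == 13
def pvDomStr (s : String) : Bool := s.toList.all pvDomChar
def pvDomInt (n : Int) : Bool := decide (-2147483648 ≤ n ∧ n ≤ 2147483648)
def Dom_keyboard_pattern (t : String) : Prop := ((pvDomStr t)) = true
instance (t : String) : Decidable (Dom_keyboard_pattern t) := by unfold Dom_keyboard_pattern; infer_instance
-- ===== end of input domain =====

set_option maxRecDepth 10000


-- B replaces A's nested rows×windows substring search by a streaming automaton over a
-- char→(row,col) coordinate map: one pass tracking the current run of same-direction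
-- adjacent keys, returning true when a run reaches 4 (objective: faster; measured faster in a timing run).

-- ===== PORT A =====
-- literal transliteration of A: for ss in rows, for i in range(len(t)-3),
-- test t[i:i+4] in ss or in ss[::-1] (ss[::-1] is ss.reverse, per PySem.List.slice?_none_none_neg_one)
def keyboard_pattern (t : String) : Bool :=
  let s : List (List Char) :=
    ["qwertyuiop".toList, "asdfghjkl".toList, "zxcvbnm".toList, "!@#$%^&*()_+".toList]
  let tl := PySem.Chars.lower t.toList
  s.any (fun ss =>
    (PySem.List.pyRange 0 ((tl.length : Int) - 3) 1).any (fun i =>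
      PySem.Chars.isIn (PySem.List.slice tl (some i) (some (i + 4))) ss ||
      PySem.Chars.isIn (PySem.List.slice tl (some i) (some (i + 4))) ss.reverse))

-- ===== PORT B =====
def kbRowsB : List (List Char) :=
  ["qwertyuiop".toList, "asdfghjkl".toList, "zxcvbnm".toList, "!@#$%^&*()_+".toList]

-- _POS = {ch: (r, c) for r, row in enumerate(_ROWS) for c, ch in enumerate(row)}
def kbPos : PySem.Dict Char (Int × Int) :=
  PySem.Dict.ofList ((PySem.List.enumerate kbRowsB).flatMap (fun rp =>
    (PySem.List.enumerate rp.2).map (fun cp => (cp.2, (rp.1, cp.1)))))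

-- _step(a, b): direction (+1/-1) if a, b are horizontally adjacent keys of one row, else None
def kpStep (a b : Char) : Option Int :=
  match PySem.Dict.get? kbPos a, PySem.Dict.get? kbPos b with
  | some p, some q => if p.1 ≠ q.1 ∨ |q.2 - p.2| ≠ 1 then none else some (q.2 - p.2)
  | _, _ => none

-- the for-loop of B: state (run, direction), early return at run ≥ 4
def kpLoop : List (Char × Char) → Int → Int → Bool
  | [], _, _ => false
  | (a, b) :: rest, run, dir =>
    let rd : Int × Int :=
      match kpStep a b with
      | none => (1, 0)
      | some d => if d = dir then (run + 1, dir) else (2, d)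
    if rd.1 ≥ 4 then true else kpLoop rest rd.1 rd.2

-- zip(t, t[1:]) with t[1:] = slice 1 none
def keyboard_pattern_alt (t : String) : Bool :=
  let tl := PySem.Chars.lower t.toList
  kpLoop (tl.zip (PySem.List.slice tl (some 1) none)) 1 0

-- ===== PRECONDITION & SPEC =====
def Spec_keyboard_pattern (t : String) (out : Bool) : Prop := out = keyboard_pattern_alt t
instance (t : String) (out : Bool) : Decidable (Spec_keyboard_pattern t out) := by unfold Spec_keyboard_pattern; infer_instance

-- ===== CLAIM (what is proved, stated in full; the proofs are below) =====
def Claim_equal_keyboard_pattern : Prop := ∀ (t : String), Dom_keyboard_pattern t → Spec_keyboard_pattern t (keyboard_pattern t)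

-- ===== LEMMAS AND PROOFS =====

-- the set of all length-4 windows of the rows and reversed rows (proof-side index)
def kbGrams : PySem.Set (List Char) :=
  PySem.Set.ofList (kbRowsB.flatMap (fun r =>
    [r, r.reverse].flatMap (fun rr =>
      (PySem.List.pyRange 0 ((rr.length : Int) - 3) 1).map (fun i =>
        PySem.List.slice rr (some i) (some (i + 4))))))

-- "a,b,c,d are four consecutive same-direction keys" at the step level
def quadB (a b c d : Char) : Bool :=
  match kpStep a b with
  | some dd => (kpStep b c == some dd) && (kpStep c d == some dd)
  | none => false

-- m further steps from x along l, all with direction dd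
def contB (dd : Int) : Nat → Char → List Char → Bool
  | 0, _, _ => true
  | _+1, _, [] => false
  | m+1, x, y :: ys => (kpStep x y == some dd) && contB dd m y ys

-- a 4-key chain starting at a
def chain3 : Char → List Char → Bool
  | _, [] => false
  | a, x :: xs =>
    match kpStep a x with
    | none => false
    | some dd => contB dd 2 x xs

-- somewhere in a::l there is a 4-key chain
def tripB : Char → List Char → Bool
  | a, x :: xs => chain3 a (x :: xs) || tripB x xs
  | _, [] => false

-- the items of the coordinate dict, as a literal
def EL : List (Char × (Int × Int)) := [('q', ((0 : Int), (0 : Int))),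
   ('w', ((0 : Int), (1 : Int))),
   ('e', ((0 : Int), (2 : Int))),
   ('r', ((0 : Int), (3 : Int))),
   ('t', ((0 : Int), (4 : Int))),
   ('y', ((0 : Int), (5 : Int))),
   ('u', ((0 : Int), (6 : Int))),
   ('i', ((0 : Int), (7 : Int))),
   ('o', ((0 : Int), (8 : Int))),
   ('p', ((0 : Int), (9 : Int))),
   ('a', ((1 : Int), (0 : Int))),
   ('s', ((1 : Int), (1 : Int))),
   ('d', ((1 : Int), (2 : Int))),
   ('f', ((1 : Int), (3 : Int))),
   ('g', ((1 : Int), (4 : Int))),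
   ('h', ((1 : Int), (5 : Int))),
   ('j', ((1 : Int), (6 : Int))),
   ('k', ((1 : Int), (7 : Int))),
   ('l', ((1 : Int), (8 : Int))),
   ('z', ((2 : Int), (0 : Int))),
   ('x', ((2 : Int), (1 : Int))),
   ('c', ((2 : Int), (2 : Int))),
   ('v', ((2 : Int), (3 : Int))),
   ('b', ((2 : Int), (4 : Int))),
   ('n', ((2 : Int), (5 : Int))),
   ('m', ((2 : Int), (6 : Int))),
   ('!', ((3 : Int), (0 : Int))),
   ('@', ((3 : Int), (1 : Int))),
   ('#', ((3 : Int), (2 : Int))),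
   ('$', ((3 : Int), (3 : Int))),
   ('%', ((3 : Int), (4 : Int))),
   ('^', ((3 : Int), (5 : Int))),
   ('&', ((3 : Int), (6 : Int))),
   ('*', ((3 : Int), (7 : Int))),
   ('(', ((3 : Int), (8 : Int))),
   (')', ((3 : Int), (9 : Int))),
   ('_', ((3 : Int), (10 : Int))),
   ('+', ((3 : Int), (11 : Int)))]

set_option maxRecDepth 10000 in
theorem items_kbPos : kbPos.items = EL := by decide

set_option maxRecDepth 10000 in
theorem T1 : ∀ w ∈ (kbGrams : List (List Char)),
    (match w with | [a,b,c,d] => quadB a b c d | _ => false) = true := by decide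

set_option maxRecDepth 10000 in
theorem chainMem : ∀ p1 ∈ EL, ∀ dd ∈ ([1,-1] : List Int),
    ∀ p2 ∈ EL, p2.2 = (p1.2.1, p1.2.2 + dd) →
    ∀ p3 ∈ EL, p3.2 = (p1.2.1, p1.2.2 + 2*dd) →
    ∀ p4 ∈ EL, p4.2 = (p1.2.1, p1.2.2 + 3*dd) →
    PySem.Set.contains kbGrams [p1.1, p2.1, p3.1, p4.1] = true := by decide

-- a length-4 list is an infix of rr iff it is the 4-window of rr at some valid offset
theorem infix_four (w rr : List Char) (hw : w.length = 4) :
    w <:+: rr ↔ ∃ j : Nat, (j : Int) < (rr.length : Int) - 3 ∧ w = (rr.drop j).take 4 := by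
  constructor
  · rintro ⟨pre, suf, rfl⟩
    refine ⟨pre.length, ?_, ?_⟩
    · simp [hw]; omega
    · rw [List.append_assoc, List.drop_left, List.take_left' hw]
  · rintro ⟨j, hj, rfl⟩
    exact ⟨rr.take j, (rr.drop j).drop 4, by
      rw [List.append_assoc, List.take_append_drop, List.take_append_drop]⟩

-- membership in the gram set, for length-4 words
theorem mem_kbGrams (w : List Char) (hw : w.length = 4) :
    PySem.Set.contains kbGrams w = true ↔
      ∃ ss ∈ kbRowsB, w <:+: ss ∨ w <:+: ss.reverse := by
  rw [PySem.Set.contains_iff]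
  unfold kbGrams
  rw [PySem.Set.mem_ofList]
  simp only [List.mem_flatMap, List.mem_map, PySem.List.mem_pyRange_one,
    List.mem_cons, List.not_mem_nil, or_false]
  constructor
  · rintro ⟨r, hr, rr, hrr, i, ⟨hi0, hi⟩, rfl⟩
    have hslice : PySem.List.slice rr (some i) (some (i + 4)) = (rr.drop i.toNat).take 4 := by
      rw [PySem.List.slice_toNat rr hi0 (by omega)]
      congr 1; omega
    refine ⟨r, hr, ?_⟩
    have hinf : PySem.List.slice rr (some i) (some (i + 4)) <:+: rr := by
      rw [hslice]
      exact ⟨rr.take i.toNat, (rr.drop i.toNat).drop 4, by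
        rw [List.append_assoc, List.take_append_drop, List.take_append_drop]⟩
    rcases hrr with rfl | rfl
    · exact Or.inl hinf
    · exact Or.inr hinf
  · rintro ⟨ss, hss, h | h⟩
    · rcases (infix_four w ss hw).1 h with ⟨j, hj, rfl⟩
      refine ⟨ss, hss, ss, Or.inl rfl, (j : Int), ⟨by positivity, hj⟩, ?_⟩
      rw [PySem.List.slice_toNat ss (by positivity) (by positivity)]
      congr 2 <;> omega
    · rcases (infix_four w ss.reverse hw).1 h with ⟨j, hj, rfl⟩
      refine ⟨ss, hss, ss.reverse, Or.inr rfl, (j : Int), ⟨by positivity, ?_⟩, ?_⟩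
      · simpa using hj
      · rw [PySem.List.slice_toNat ss.reverse (by positivity) (by positivity)]
        congr 2 <;> omega

-- windows drawn from the valid index range have length 4
theorem window_len (tl : List Char) (i : Int) (hi0 : 0 ≤ i) (hi : i < (tl.length : Int) - 3) :
    (PySem.List.slice tl (some i) (some (i + 4))).length = 4 := by
  rw [PySem.List.slice_toNat tl hi0 (by omega)]
  simp [List.length_take, List.length_drop]
  omega

-- a step, if any, has direction ±1
theorem step_dir (a b : Char) (d : Int) (h : kpStep a b = some d) : d = 1 ∨ d = -1 := by
  unfold kpStep at h
  rcases hp : PySem.Dict.get? kbPos a with _ | p <;> rw [hp] at h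
  · simp at h
  rcases hq : PySem.Dict.get? kbPos b with _ | q <;> rw [hq] at h
  · simp at h
  by_cases hc : p.1 ≠ q.1 ∨ |q.2 - p.2| ≠ 1
  · simp [hc] at h
  · simp [hc] at h
    push_neg at hc
    rcases (abs_eq (by norm_num : (0:Int) ≤ 1)).1 hc.2 with h1 | h1 <;> omega

-- a step unpacked into coordinates
theorem step_spec (a b : Char) (d : Int) (h : kpStep a b = some d) :
    ∃ p q, PySem.Dict.get? kbPos a = some p ∧ PySem.Dict.get? kbPos b = some q ∧
      q.1 = p.1 ∧ q.2 = p.2 + d := by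
  unfold kpStep at h
  rcases hp : PySem.Dict.get? kbPos a with _ | p <;> rw [hp] at h
  · simp at h
  rcases hq : PySem.Dict.get? kbPos b with _ | q <;> rw [hq] at h
  · simp at h
  by_cases hc : p.1 ≠ q.1 ∨ |q.2 - p.2| ≠ 1
  · simp [hc] at h
  · simp [hc] at h
    push_neg at hc
    exact ⟨p, q, rfl, rfl, hc.1.symm, by omega⟩

-- no step has direction 0, so a fresh state can never extend a chain
theorem contB_zero (m : Nat) (x : Char) (l : List Char) : contB 0 (m+1) x l = false := by
  cases l with
  | nil => rfl
  | cons y ys =>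
    unfold contB
    rcases h : kpStep x y with _ | d
    · simp
    · rcases step_dir x y d h with rfl | rfl <;> simp

-- a longer chain contains a shorter one
theorem contB_mono (dd : Int) (m : Nat) (x : Char) (l : List Char)
    (h : contB dd (m+1) x l = true) : contB dd m x l = true := by
  induction m generalizing x l with
  | zero => rfl
  | succ n ih =>
    cases l with
    | nil => simp [contB] at h
    | cons y ys =>
      unfold contB at h ⊢
      rcases Bool.and_eq_true_iff.1 h with ⟨h1, h2⟩
      exact Bool.and_eq_true_iff.2 ⟨h1, ih y ys h2⟩

-- the step-level quad is exactly membership in the gram set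
theorem Gq (a b c d : Char) :
    PySem.Set.contains kbGrams [a, b, c, d] = quadB a b c d := by
  rw [Bool.eq_iff_iff]
  constructor
  · intro h
    have := T1 [a, b, c, d] ((PySem.Set.contains_iff _ _).1 h)
    exact this
  · intro h
    unfold quadB at h
    rcases h1 : kpStep a b with _ | dd <;> rw [h1] at h
    · simp at h
    rcases Bool.and_eq_true_iff.1 h with ⟨h2, h3⟩
    have h2 : kpStep b c = some dd := by simpa using h2
    have h3 : kpStep c d = some dd := by simpa using h3
    obtain ⟨pa, pb, hga, hgb, hr1, hc1⟩ := step_spec a b dd h1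
    obtain ⟨pb', pc, hgb', hgc, hr2, hc2⟩ := step_spec b c dd h2
    obtain ⟨pc', pd, hgc', hgd, hr3, hc3⟩ := step_spec c d dd h3
    rw [hgb] at hgb'; rw [hgc] at hgc'
    obtain rfl : pb = pb' := by injection hgb'
    obtain rfl : pc = pc' := by injection hgc'
    have ma : (a, pa) ∈ EL := items_kbPos ▸ PySem.Dict.mem_items_of_get?_eq_some _ hga
    have mb : (b, pb) ∈ EL := items_kbPos ▸ PySem.Dict.mem_items_of_get?_eq_some _ hgb
    have mc : (c, pc) ∈ EL := items_kbPos ▸ PySem.Dict.mem_items_of_get?_eq_some _ hgc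
    have md : (d, pd) ∈ EL := items_kbPos ▸ PySem.Dict.mem_items_of_get?_eq_some _ hgd
    have hdd : dd ∈ ([1, -1] : List Int) := by
      rcases step_dir a b dd h1 with rfl | rfl <;> simp
    exact chainMem (a, pa) ma dd hdd (b, pb) mb (by ext <;> simp <;> omega)
      (c, pc) mc (by ext <;> simp <;> omega)
      (d, pd) md (by ext <;> simp <;> omega)

-- chain3 on a long-enough tail is the quad at the front
theorem chain3_long (a b c d : Char) (rest : List Char) :
    chain3 a (b :: c :: d :: rest) = quadB a b c d := by
  unfold quadB
  rcases h : kpStep a b with _ | dd <;> simp only [chain3, h]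
  show ((kpStep b c == some dd) && ((kpStep c d == some dd) && true)) = _
  simp

-- chain3 needs at least three further characters
theorem chain3_short (a : Char) (l : List Char) (h : l.length < 3) : chain3 a l = false := by
  match l, h with
  | [], _ => rfl
  | [x], _ =>
    show (match kpStep a x with | none => false | some dd => contB dd 2 x []) = false
    cases kpStep a x <;> rfl
  | [x, y], _ =>
    show (match kpStep a x with | none => false | some dd => contB dd 2 x [y]) = false
    rcases kpStep a x with _ | dd
    · rfl
    · show ((kpStep x y == some dd) && false) = false
      simp

-- tripB finds exactly the windows the gram set accepts
theorem tripB_iff (l : List Char) (a : Char) :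
    tripB a l = true ↔
      ∃ j : Nat, j + 3 < (a :: l).length ∧
        PySem.Set.contains kbGrams (((a :: l).drop j).take 4) = true := by
  induction l generalizing a with
  | nil =>
    simp only [tripB, List.length_cons, List.length_nil]
    constructor
    · intro h; cases h
    · rintro ⟨j, hj, _⟩; omega
  | cons x xs ih =>
    have hsplit : tripB a (x :: xs) = (chain3 a (x :: xs) || tripB x xs) := rfl
    rw [hsplit, Bool.or_eq_true_iff, ih x]
    constructor
    · rintro (h | ⟨j, hj, hc⟩)
      · match xs, h with
        | c :: d :: rest, h =>
          rw [chain3_long] at h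
          exact ⟨0, by simp, by simpa [← Gq] using h⟩
        | [], h => rw [chain3_short a [x] (by simp)] at h; cases h
        | [c], h => rw [chain3_short a [x, c] (by simp)] at h; cases h
      · exact ⟨j + 1, by simpa using hj, by simpa using hc⟩
    · rintro ⟨j, hj, hc⟩
      cases j with
      | zero =>
        left
        match xs, hj with
        | c :: d :: rest, _ =>
          rw [chain3_long]
          rw [← Gq]
          simpa using hc
      | succ j =>
        right
        exact ⟨j, by simpa using hj, by simpa using hc⟩

-- the automaton loop: with a consistent state it reports "the current run extends to 4"
-- or "a fresh 4-chain occurs later"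
theorem loop_eq (l : List Char) (a : Char) (run dir : Int)
    (h1 : 1 ≤ run) (h3 : run ≤ 3) (hd1 : run = 1 → dir = 0)
    (hd2 : 2 ≤ run → dir = 1 ∨ dir = -1) :
    kpLoop ((a :: l).zip l) run dir = (contB dir (4 - run).toNat a l || tripB a l) := by
  induction l generalizing a run dir with
  | nil =>
    obtain ⟨m, hmeq⟩ : ∃ m : Nat, (4 - run).toNat = m + 1 := ⟨(4 - run).toNat - 1, by omega⟩
    simp only [List.zip_nil_right, kpLoop, tripB, hmeq]
    simp [contB]
  | cons x xs ih =>
    have hzip : (a :: x :: xs).zip (x :: xs) = (a, x) :: ((x :: xs).zip xs) := rfl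
    rw [hzip]
    have htrip : tripB a (x :: xs) = (chain3 a (x :: xs) || tripB x xs) := rfl
    rcases hs : kpStep a x with _ | d
    · -- no step: the state resets
      have lhs : kpLoop ((a, x) :: ((x :: xs).zip xs)) run dir = kpLoop ((x :: xs).zip xs) 1 0 := by
        simp [kpLoop, hs]
      rw [lhs, ih x 1 0 (by omega) (by omega) (fun _ => rfl) (by omega)]
      rw [show ((4:Int) - 1).toNat = 2 + 1 from rfl, contB_zero]
      have hch : chain3 a (x :: xs) = false := by simp only [chain3, hs]
      have hcont : contB dir (4 - run).toNat a (x :: xs) = false := by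
        obtain ⟨m, hmeq⟩ : ∃ m : Nat, (4 - run).toNat = m + 1 := ⟨(4 - run).toNat - 1, by omega⟩
        rw [hmeq]; unfold contB; simp [hs]
      rw [htrip, hch, hcont]
      simp
    · have hd := step_dir a x d hs
      have hch : chain3 a (x :: xs) = contB d 2 x xs := by simp only [chain3, hs]
      rw [htrip, hch]
      by_cases hde : d = dir
      · subst hde
        have hrun : run = 2 ∨ run = 3 := by
          rcases Int.lt_or_le run 2 with h | h
          · exfalso; have h0 := hd1 (by omega); rcases hd with rfl | rfl <;> simp at h0
          · omega
        rcases hrun with rfl | rfl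
        · -- run = 2 → 3
          have lhs : kpLoop ((a, x) :: ((x :: xs).zip xs)) 2 d = kpLoop ((x :: xs).zip xs) 3 d := by
            simp [kpLoop, hs]
          rw [lhs, ih x 3 d (by omega) (by omega) (by omega) (fun _ => hd)]
          rw [show ((4:Int) - 3).toNat = 1 from rfl, show ((4:Int) - 2).toNat = 2 from rfl]
          have hc : contB d 2 a (x :: xs) = contB d 1 x xs := by
            show ((kpStep a x == some d) && contB d 1 x xs) = contB d 1 x xs
            rw [hs]; simp
          rw [hc]
          cases h2 : contB d 2 x xs
          · simp
          · have h1' := contB_mono d 1 x xs h2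
            simp [h1']
        · -- run = 3: the chain completes now
          have lhs : kpLoop ((a, x) :: ((x :: xs).zip xs)) 3 d = true := by
            simp [kpLoop, hs]
          rw [lhs, show ((4:Int) - 3).toNat = 1 from rfl]
          have hc : contB d 1 a (x :: xs) = true := by
            show ((kpStep a x == some d) && contB d 0 x xs) = true
            rw [hs]; simp [contB]
          rw [hc]
          simp
      · -- direction change: the run restarts at these two keys
        have lhs : kpLoop ((a, x) :: ((x :: xs).zip xs)) run dir = kpLoop ((x :: xs).zip xs) 2 d := by
          simp [kpLoop, hs, hde]
        rw [lhs, ih x 2 d (by omega) (by omega) (by omega) (fun _ => hd)]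
        have hcont : contB dir (4 - run).toNat a (x :: xs) = false := by
          obtain ⟨m, hmeq⟩ : ∃ m : Nat, (4 - run).toNat = m + 1 := ⟨(4 - run).toNat - 1, by omega⟩
          rw [hmeq]; unfold contB; simp [hs, hde]
        rw [hcont, show ((4:Int) - 2).toNat = 2 from rfl]
        simp

-- A's nested scan accepts exactly the strings with a window in the gram set
theorem A_iff (tl : List Char) :
    (kbRowsB.any (fun ss =>
      (PySem.List.pyRange 0 ((tl.length : Int) - 3) 1).any (fun i =>
        PySem.Chars.isIn (PySem.List.slice tl (some i) (some (i + 4))) ss ||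
        PySem.Chars.isIn (PySem.List.slice tl (some i) (some (i + 4))) ss.reverse))) = true
    ↔ ∃ j : Nat, j + 3 < tl.length ∧
        PySem.Set.contains kbGrams ((tl.drop j).take 4) = true := by
  simp only [List.any_eq_true, PySem.List.mem_pyRange_one]
  constructor
  · rintro ⟨ss, hss, i, ⟨hi0, hilt⟩, hin⟩
    have hw := window_len tl i hi0 hilt
    refine ⟨i.toNat, by omega, ?_⟩
    have hslice : PySem.List.slice tl (some i) (some (i + 4)) = (tl.drop i.toNat).take 4 := by
      rw [PySem.List.slice_toNat tl hi0 (by omega)]; congr 1; omega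
    rw [← hslice, mem_kbGrams _ hw]
    rcases Bool.or_eq_true_iff.1 hin with h | h
    · exact ⟨ss, hss, Or.inl ((PySem.Chars.isIn_iff_infix _ _).1 h)⟩
    · exact ⟨ss, hss, Or.inr ((PySem.Chars.isIn_iff_infix _ _).1 h)⟩
  · rintro ⟨j, hj, hmem⟩
    have hilt : (j : Int) < (tl.length : Int) - 3 := by omega
    have hslice : PySem.List.slice tl (some (j : Int)) (some ((j : Int) + 4)) = (tl.drop j).take 4 := by
      rw [PySem.List.slice_toNat tl (by positivity) (by positivity)]
      congr 1 <;> omega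
    rw [← hslice] at hmem
    rw [mem_kbGrams _ (window_len tl j (by positivity) hilt)] at hmem
    obtain ⟨ss, hss, h | h⟩ := hmem
    · exact ⟨ss, hss, (j : Int), ⟨by positivity, hilt⟩,
        Bool.or_eq_true_iff.2 (Or.inl ((PySem.Chars.isIn_iff_infix _ _).2 h))⟩
    · exact ⟨ss, hss, (j : Int), ⟨by positivity, hilt⟩,
        Bool.or_eq_true_iff.2 (Or.inr ((PySem.Chars.isIn_iff_infix _ _).2 h))⟩

theorem key_eq (t : String) : keyboard_pattern t = keyboard_pattern_alt t := by
  simp only [keyboard_pattern, keyboard_pattern_alt]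
  rcases htl : PySem.Chars.lower t.toList with _ | ⟨a, l⟩
  · decide
  · rw [PySem.List.slice_from_one]
    simp only [List.tail_cons]
    rw [loop_eq l a 1 0 (by omega) (by omega) (fun _ => rfl) (by omega)]
    rw [show ((4:Int) - 1).toNat = 2 + 1 from rfl, contB_zero]
    rw [Bool.false_or, Bool.eq_iff_iff, tripB_iff]
    have hA := A_iff (a :: l)
    unfold kbRowsB at hA
    exact hA

-- ===== VERDICT (by name: the statement is the Claim_ definition above) =====
theorem keyboard_pattern_spec : Claim_equal_keyboard_pattern := by
  intro t _
  unfold Spec_keyboard_pattern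
  exact key_eq t
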